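-- pv_equiv track=rewrite | github.com/SuchismitaDhal/Solutions-dailyInterviewPro | scratch.py | solve
-- ===== SOURCE A (Python) =====
-- def solve(scores, n):
--     scores = sorted(scores)
--     dp = [[0]*n for _ in range(n)]
--     sol = 0
--
--     for i in range(n):
--         t = scores[0] + i + 1
--         curr = 0
--         visited = set()
--         for j in range(n):
--             d = t - scores[j]
--             if d not in visited:
--                 dp[i][j] = 1
--                 visited.add(d)
--                 curr += 1
--                 sol = max(sol, curr)
--     return sol
-- ===== SOURCE B (Python) =====
-- def solve(scores, n):
--     scores = sorted(scores)
--     count = 0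
--     prev = None
--     for j in range(n):
--         v = scores[j]
--         if j == 0 or v != prev:
--             count += 1
--         prev = v
--     return count
-- ===== Notes on version B (the rewrite author's own statement) =====
-- stated objective: faster
-- what changed: A's nested n*n loop with a per-row set (counting distinct shifted differences) is replaced by a single linear scan of the sorted prefix that counts positions where the value changes, which equals the number of distinct values among the n smallest scores.
import Mathlib
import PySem

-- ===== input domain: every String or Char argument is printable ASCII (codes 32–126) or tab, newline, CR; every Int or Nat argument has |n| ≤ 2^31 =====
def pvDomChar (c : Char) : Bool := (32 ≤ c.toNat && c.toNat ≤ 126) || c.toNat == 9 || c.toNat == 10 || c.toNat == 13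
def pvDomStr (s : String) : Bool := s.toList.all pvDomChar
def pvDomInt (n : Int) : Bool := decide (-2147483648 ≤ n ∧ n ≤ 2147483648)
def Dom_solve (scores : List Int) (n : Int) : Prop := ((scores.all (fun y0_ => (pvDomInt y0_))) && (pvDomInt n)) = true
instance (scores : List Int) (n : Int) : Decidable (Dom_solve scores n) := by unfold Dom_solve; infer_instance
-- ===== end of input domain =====

-- B replaces A's nested n×n loop + per-row set (counting distinct shifted differences) by one
-- linear scan of the sorted prefix counting value changes; equal return values proved on Pre_.

-- ===== PORT A =====
-- inner-loop body of A, applied to j and v = scores[j] (d = t - v; `if d not in visited`)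
def astep (t i : Int) (st2 : List (List Int) × Int × Int × PySem.Set Int) (j v : Int) :
    List (List Int) × Int × Int × PySem.Set Int :=
  if PySem.Set.contains st2.2.2.2 (t - v) = false then
    (PySem.List.pySetD st2.1 i (PySem.List.pySetD (PySem.List.pyGetD st2.1 i []) j (1 : Int)),
     max st2.2.1 (st2.2.2.1 + 1), st2.2.2.1 + 1, PySem.Set.add st2.2.2.2 (t - v))
  else st2

-- body of A's outer loop over i: runs the inner loop with t = scores[0] + i + 1, curr = 0, visited = set()
def ainner (s : List Int) (n : Int) (st : List (List Int) × Int) (i : Int) :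
    List (List Int) × Int :=
  let inner := (PySem.List.pyRange 0 n 1).foldl
    (fun st2 j => astep (PySem.List.pyGetD s 0 0 + i + 1) i st2 j (PySem.List.pyGetD s j 0))
    (st.1, st.2, 0, PySem.Set.empty)
  (inner.1, inner.2.1)

def solve (scores : List Int) (n : Int) : Int :=
  ((PySem.List.pyRange 0 n 1).foldl
      (ainner (PySem.List.sorted scores (fun x => x) false) n)
      (List.replicate n.toNat (List.replicate n.toNat (0 : Int)), 0)).2

-- ===== PORT B =====
-- loop body of B: v = scores[j]; count += 1 if j == 0 or v != prev; prev = v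
def bscan (s : List Int) (st : Int × Option Int) (j : Int) : Int × Option Int :=
  (if j = 0 ∨ some (PySem.List.pyGetD s j 0) ≠ st.2 then st.1 + 1 else st.1,
   some (PySem.List.pyGetD s j 0))

def solve_alt (scores : List Int) (n : Int) : Int :=
  ((PySem.List.pyRange 0 n 1).foldl
      (bscan (PySem.List.sorted scores (fun x => x) false))
      ((0 : Int), (none : Option Int))).1

-- ===== PRECONDITION & SPEC =====
-- A (and B) raise IndexError on scores[j] when n > len(scores); excluded here, nothing else.
def Pre_solve (scores : List Int) (n : Int) : Prop := n ≤ 0 ∨ n ≤ (scores.length : Int)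
instance (scores : List Int) (n : Int) : Decidable (Pre_solve scores n) := by
  unfold Pre_solve; infer_instance
def pvWitness_solve : List Int × Int := ([3, 1, 3, 2], 3)
def Spec_solve (scores : List Int) (n : Int) (out : Int) : Prop := out = solve_alt scores n
instance (scores : List Int) (n : Int) (out : Int) : Decidable (Spec_solve scores n out) := by
  unfold Spec_solve; infer_instance

-- ===== CLAIM (what is proved, stated in full; the proofs are below) =====
def Claim_equal_solve : Prop := ∀ (scores : List Int) (n : Int),
  Dom_solve scores n → Pre_solve scores n → Spec_solve scores n (solve scores n)

-- ===== LEMMAS AND PROOFS =====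

-- value step of B's scan once j ≠ 0
def bstep (st : Int × Option Int) (v : Int) : Int × Option Int :=
  (if some v ≠ st.2 then st.1 + 1 else st.1, some v)

-- [s[j] for j in range(a, n)] is the segment s[a:n] (as a map over pyRange)
lemma prefix_map (xs : List Int) (a n : Int) (h0 : 0 ≤ a) (han : a ≤ n)
    (hn : n ≤ (xs.length : Int)) :
    (PySem.List.pyRange a n 1).map (fun j => PySem.List.pyGetD xs j 0)
      = (xs.take n.toNat).drop a.toNat := by
  apply List.ext_getElem
  · simp [PySem.List.length_pyRange_one]; omega
  · intro k h1 h2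
    simp only [List.length_map, PySem.List.length_pyRange_one] at h1
    simp only [List.getElem_map, PySem.List.getElem_pyRange_one, List.getElem_drop,
      List.getElem_take]
    rw [PySem.List.pyGetD_eq_getElem xs 0 (by omega) (by omega)]
    congr 1
    omega

-- a set built from a list mapped through an injective function is the mapped set
lemma ofList_map_inj (f : Int → Int) (hf : Function.Injective f) (l : List Int) :
    PySem.Set.ofList (l.map f) = (PySem.Set.ofList l).map f := by
  induction l using List.reverseRecOn with
  | nil => simp [PySem.Set.ofList_nil]
  | append_singleton l x ih =>
    rw [List.map_append, List.map_singleton, PySem.Set.ofList_append_singleton,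
      PySem.Set.ofList_append_singleton, ih]
    by_cases hx : x ∈ PySem.Set.ofList l
    · rw [PySem.Set.add_of_mem hx, PySem.Set.add_of_mem
        (List.mem_map.mpr ⟨x, hx, rfl⟩)]
    · rw [PySem.Set.add_of_not_mem hx, PySem.Set.add_of_not_mem
        (fun hm => hx (by obtain ⟨y, hy, hyx⟩ := List.mem_map.mp hm; rwa [← hf hyx])),
        List.map_append, List.map_singleton]

-- invariant of A's inner loop: visited collects the d's, curr counts the new ones, sol maxes curr
lemma inner_run (s : List Int) (t i : Int) (l : List Int) :
    ∀ (dp : List (List Int)) (sol curr : Int) (vis : PySem.Set Int), curr ≤ sol →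
      (l.foldl (fun st2 j => astep t i st2 j (PySem.List.pyGetD s j 0))
          (dp, sol, curr, vis)).2.2.2
        = PySem.Set.update vis (l.map (fun j => t - PySem.List.pyGetD s j 0)) ∧
      (l.foldl (fun st2 j => astep t i st2 j (PySem.List.pyGetD s j 0))
          (dp, sol, curr, vis)).2.2.1
        = curr + (((l.foldl (fun st2 j => astep t i st2 j (PySem.List.pyGetD s j 0))
            (dp, sol, curr, vis)).2.2.2.length : Int) - (vis.length : Int)) ∧
      (l.foldl (fun st2 j => astep t i st2 j (PySem.List.pyGetD s j 0))
          (dp, sol, curr, vis)).2.1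
        = max sol (l.foldl (fun st2 j => astep t i st2 j (PySem.List.pyGetD s j 0))
            (dp, sol, curr, vis)).2.2.1 ∧
      vis.length ≤ (l.foldl (fun st2 j => astep t i st2 j (PySem.List.pyGetD s j 0))
          (dp, sol, curr, vis)).2.2.2.length := by
  induction l with
  | nil =>
    intro dp sol curr vis h
    refine ⟨by simp [PySem.Set.update_nil], by simp, ?_, le_refl _⟩
    simp [max_eq_left h]
  | cons x l ih =>
    intro dp sol curr vis h
    simp only [List.foldl_cons, List.map_cons]
    by_cases hmem : (t - PySem.List.pyGetD s x 0) ∈ vis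
    · have hstep : astep t i (dp, sol, curr, vis) x (PySem.List.pyGetD s x 0)
          = (dp, sol, curr, vis) := by simp [astep, hmem]
      rw [hstep, PySem.Set.update_cons, PySem.Set.add_of_mem hmem]
      exact ih dp sol curr vis h
    · have hstep : astep t i (dp, sol, curr, vis) x (PySem.List.pyGetD s x 0)
          = (PySem.List.pySetD dp i (PySem.List.pySetD (PySem.List.pyGetD dp i []) x (1 : Int)),
             max sol (curr + 1), curr + 1, vis.add (t - PySem.List.pyGetD s x 0)) := by
        simp [astep, hmem]
      rw [hstep]
      have hlen : (vis.add (t - PySem.List.pyGetD s x 0)).length = vis.length + 1 := by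
        rw [PySem.Set.add_of_not_mem hmem]; simp
      obtain ⟨h1, h2, h3, h4⟩ := ih
        (PySem.List.pySetD dp i (PySem.List.pySetD (PySem.List.pyGetD dp i []) x (1 : Int)))
        (max sol (curr + 1)) (curr + 1) (vis.add (t - PySem.List.pyGetD s x 0))
        (le_max_right _ _)
      rw [hlen] at h4
      have hcc : curr + 1 ≤ (List.foldl (fun st2 j => astep t i st2 j (PySem.List.pyGetD s j 0))
          (PySem.List.pySetD dp i (PySem.List.pySetD (PySem.List.pyGetD dp i []) x (1 : Int)),
           max sol (curr + 1), curr + 1, vis.add (t - PySem.List.pyGetD s x 0)) l).2.2.1 := by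
        rw [h2, hlen]; push_cast; omega
      refine ⟨?_, ?_, ?_, by omega⟩
      · rw [h1, PySem.Set.update_cons]
      · rw [h2, hlen]; push_cast; ring
      · rw [h3, max_assoc, max_eq_right hcc]

-- a fold whose step maxes the second component with a fixed C, over a nonempty list
lemma foldl_snd_max {σ : Type} (F : (σ × Int) → Int → (σ × Int)) (C : Int)
    (hF : ∀ st i, 0 ≤ st.2 → (F st i).2 = max st.2 C) (hC : 0 ≤ C) :
    ∀ (l : List Int) (st : σ × Int), 0 ≤ st.2 → l ≠ [] →
      (l.foldl F st).2 = max st.2 C := by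
  intro l
  induction l with
  | nil => intro st h hne; exact absurd rfl hne
  | cons x l ih =>
    intro st h _
    simp only [List.foldl_cons]
    by_cases hl : l = []
    · subst hl; simp [hF st x h]
    · rw [ih (F st x) (by rw [hF st x h]; exact le_trans hC (le_max_right _ _)) hl,
        hF st x h, max_assoc, max_self]

-- invariant of B's scan on a sorted remainder: count = #distinct of the processed prefix
lemma bstep_run : ∀ (rest pre : List Int) (p : Int), p ∈ pre → (∀ x ∈ pre, x ≤ p) →
    (∀ x ∈ rest, p ≤ x) → List.Pairwise (· ≤ ·) rest →
    (rest.foldl bstep (((PySem.Set.ofList pre).length : Int), some p)).1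
      = ((PySem.Set.ofList (pre ++ rest)).length : Int) := by
  intro rest
  induction rest with
  | nil => intro pre p _ _ _ _; simp
  | cons v rest ih =>
    intro pre p hp hpre hge hpw
    have hrest_ge : ∀ x ∈ rest, v ≤ x := fun x hx => (List.pairwise_cons.mp hpw).1 x hx
    have hpw' : List.Pairwise (· ≤ ·) rest := (List.pairwise_cons.mp hpw).2
    simp only [List.foldl_cons]
    by_cases hvp : v = p
    · subst hvp
      have hstep : bstep (((PySem.Set.ofList pre).length : Int), some v) v
          = (((PySem.Set.ofList (pre ++ [v])).length : Int), some v) := by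
        rw [PySem.Set.ofList_append_singleton,
          PySem.Set.add_of_mem ((PySem.Set.mem_ofList _ _).mpr hp)]
        simp [bstep]
      rw [hstep, ih (pre ++ [v]) v (by simp) (by
          intro x hx
          rcases List.mem_append.mp hx with hx | hx
          · exact hpre x hx
          · simp at hx; omega)
        (fun x hx => hrest_ge x hx) hpw']
      rw [List.append_assoc]; rfl
    · have hlt : p < v := lt_of_le_of_ne (hge v (List.mem_cons_self)) (fun e => hvp e.symm)
      have hnot : v ∉ PySem.Set.ofList pre := fun hm =>
        absurd (hpre v ((PySem.Set.mem_ofList _ _).mp hm)) (not_le.mpr hlt)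
      have hstep : bstep (((PySem.Set.ofList pre).length : Int), some p) v
          = (((PySem.Set.ofList (pre ++ [v])).length : Int), some v) := by
        rw [PySem.Set.ofList_append_singleton, PySem.Set.add_of_not_mem hnot]
        simp [bstep]
        omega
      rw [hstep, ih (pre ++ [v]) v (by simp) (by
          intro x hx
          rcases List.mem_append.mp hx with hx | hx
          · exact le_of_lt (lt_of_le_of_lt (hpre x hx) hlt)
          · simp at hx; omega)
        (fun x hx => hrest_ge x hx) hpw']
      rw [List.append_assoc]; rfl

-- ===== VERDICT (by name: the statement is the Claim_ definition above) =====
theorem solve_spec : Claim_equal_solve := by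
  intro scores n _ hpre
  show solve scores n = solve_alt scores n
  by_cases hn : n ≤ 0
  · unfold solve solve_alt
    rw [PySem.List.pyRange_one_eq_nil (by omega)]
    simp
  · rw [not_le] at hn
    have hnlen : n ≤ (scores.length : Int) := by
      rcases hpre with h | h
      · omega
      · exact h
    unfold solve solve_alt
    set L := PySem.List.sorted scores (fun x => x) false with hLdef
    have hLlen : (L.length : Int) = (scores.length : Int) := by
      rw [hLdef, PySem.List.length_sorted]
    have hLpw : List.Pairwise (· ≤ ·) L := PySem.List.sorted_pairwise scores (fun x => x)
    obtain ⟨x0, tl, hLc⟩ : ∃ a l, L = a :: l := by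
      cases hL : L with
      | nil => rw [hL] at hLlen; simp at hLlen; omega
      | cons a l => exact ⟨a, l, rfl⟩
    set C : Int := ((PySem.Set.ofList (L.take n.toNat)).length : Int) with hCdef
    have hC : 0 ≤ C := Int.natCast_nonneg _
    have hmapv : (PySem.List.pyRange 0 n 1).map (fun j => PySem.List.pyGetD L j 0)
        = L.take n.toNat := by
      rw [prefix_map L 0 n le_rfl (by omega) (by omega)]
      simp
    -- A's side: every outer iteration maxes sol with C
    have hF : ∀ (st : List (List Int) × Int) (i : Int), 0 ≤ st.2 →
        (ainner L n st i).2 = max st.2 C := by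
      intro st i hst
      obtain ⟨h1, h2, h3, _⟩ := inner_run L (PySem.List.pyGetD L 0 0 + i + 1) i
        (PySem.List.pyRange 0 n 1) st.1 st.2 0 PySem.Set.empty hst
      simp only [ainner]
      rw [h3, h2, h1]
      have hmap : (PySem.List.pyRange 0 n 1).map
          (fun j => PySem.List.pyGetD L 0 0 + i + 1 - PySem.List.pyGetD L j 0)
          = (L.take n.toNat).map (fun v => PySem.List.pyGetD L 0 0 + i + 1 - v) := by
        rw [show (fun j => PySem.List.pyGetD L 0 0 + i + 1 - PySem.List.pyGetD L j 0)
            = ((fun v => PySem.List.pyGetD L 0 0 + i + 1 - v) ∘ fun j => PySem.List.pyGetD L j 0)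
            from rfl, ← List.map_map, hmapv]
      rw [hmap, show (PySem.Set.empty : PySem.Set Int) = [] from rfl,
        PySem.Set.update_nil_left,
        ofList_map_inj _ (fun a b hab => by omega) _, List.length_map]
      simp [hCdef]
    have hA : ((PySem.List.pyRange 0 n 1).foldl (ainner L n)
        (List.replicate n.toNat (List.replicate n.toNat (0 : Int)), 0)).2 = C := by
      rw [foldl_snd_max (ainner L n) C hF hC _ _ le_rfl
        (by rw [PySem.List.pyRange_one_cons (by omega : (0:Int) < n)]; simp)]
      exact max_eq_right hC
    -- B's side: the scan over the sorted prefix counts its distinct values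
    have hB : ((PySem.List.pyRange 0 n 1).foldl (bscan L) ((0 : Int), (none : Option Int))).1
        = C := by
      rw [PySem.List.pyRange_one_cons (by omega : (0:Int) < n)]
      simp only [List.foldl_cons]
      have hstep : bscan L ((0 : Int), (none : Option Int)) 0
          = (((PySem.Set.ofList [x0]).length : Int), some x0) := by
        simp [bscan, hLc, PySem.List.pyGetD_zero_cons, PySem.Set.ofList_cons,
          PySem.Set.ofList_nil]
      simp only [zero_add]
      rw [hstep,
        PySem.List.foldl_congr_mem' (PySem.List.pyRange 1 n 1) (bscan L)
          (fun st j => bstep st (PySem.List.pyGetD L j 0))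
          (((PySem.Set.ofList [x0]).length : Int), some x0)
          (by
            intro j hj st
            have h1j : 1 ≤ j := (PySem.List.mem_pyRange_one.mp hj).1
            simp [bscan, bstep, show ¬ j = 0 by omega]),
        ← List.foldl_map,
        prefix_map L 1 n (by omega) (by omega) (by omega)]
      have htk : L.take n.toNat = x0 :: tl.take (n.toNat - 1) := by
        obtain ⟨k, hk⟩ : ∃ k, n.toNat = k + 1 := ⟨n.toNat - 1, by omega⟩
        rw [hLc, hk]
        simp [List.take_succ_cons]
      rw [htk]
      simp only [Int.toNat_one, List.drop_succ_cons, List.drop_zero]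
      have := bstep_run (tl.take (n.toNat - 1)) [x0] x0 (by simp) (by simp)
        (fun x hx => (List.pairwise_cons.mp (hLc ▸ hLpw)).1 x (List.take_subset _ _ hx))
        (List.Pairwise.sublist (List.take_sublist _ _) (List.pairwise_cons.mp (hLc ▸ hLpw)).2)
      rw [this, hCdef, htk]
      simp
    rw [hA, hB]
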